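-- pv_equiv track=rewrite | github.com/shashank231/practice-design | zcodes/raman3.py | max_to_left_fun
-- ===== SOURCE A (Python) =====
-- def max_to_left_fun(arr):
--     lenArr = len(arr)
--     startIndex = 0
--     ansArr = [-1] * lenArr
--     maxEle = arr[startIndex]
--
--     for index in range(startIndex+1, lenArr):
--         if arr[index] < maxEle:
--             ansArr[index] = maxEle
--         else:
--             maxEle = arr[index]
--
--     return ansArr
-- ===== SOURCE B (Python) =====
-- def max_to_left_fun(arr):
--     # Divide and conquer: solve(seg, m) answers for segment `seg` given that
--     # m is the maximum of all elements before the segment (None = empty prefix).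
--     def solve(seg, m):
--         if len(seg) >= 2:
--             mid = len(seg) // 2
--             left, right = seg[:mid], seg[mid:]
--             m2 = max(left) if m is None else max(m, max(left))
--             return solve(left, m) + solve(right, m2)
--         if not seg:
--             return []
--         x = seg[0]
--         return [m if m is not None and x < m else -1]
--     return solve(arr, None)
-- ===== Notes on version B (the rewrite author's own statement) =====
-- stated objective: alternative
-- what changed: Replaces the single mutate-in-place index loop carrying a running maximum with a divide-and-conquer recursion: split the segment in half, solve the left half under the incoming prefix maximum, then solve the right half under max(m, max(left)).
-- outside the precondition, e.g. on max_to_left_fun([]): A raises IndexError, B returns []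
import Mathlib
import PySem

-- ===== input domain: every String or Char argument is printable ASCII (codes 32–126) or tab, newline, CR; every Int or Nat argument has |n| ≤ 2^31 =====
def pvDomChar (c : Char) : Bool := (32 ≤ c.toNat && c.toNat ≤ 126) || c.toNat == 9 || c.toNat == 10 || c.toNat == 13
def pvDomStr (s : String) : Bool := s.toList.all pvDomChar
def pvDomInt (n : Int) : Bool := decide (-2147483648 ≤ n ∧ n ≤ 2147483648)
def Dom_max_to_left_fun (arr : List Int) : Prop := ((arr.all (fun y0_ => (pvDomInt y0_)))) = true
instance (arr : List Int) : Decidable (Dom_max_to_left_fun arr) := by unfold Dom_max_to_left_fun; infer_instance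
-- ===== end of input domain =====

-- B replaces A's mutate-in-place index loop with a divide-and-conquer recursion on segments; return values only.

-- ===== PORT A =====
-- one loop step: 'if arr[index] < maxEle: ansArr[index] = maxEle else: maxEle = arr[index]'
def pvStepA (arr : List Int) (st : List Int × Int) (i : Int) : List Int × Int :=
  match PySem.List.pyGet? arr i with
  | none => st            -- IndexError; unreachable, the loop indices are in range
  | some x => if x < st.2 then (st.1.set i.toNat st.2, st.2) else (st.1, x)

def max_to_left_fun (arr : List Int) : List Int :=
  match PySem.List.pyGet? arr 0 with
  | none => []            -- maxEle = arr[0] raises IndexError; excluded by Pre_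
  | some m0 =>
    ((PySem.List.pyRange 1 arr.length 1).foldl (pvStepA arr)
      (List.replicate arr.length (-1), m0)).1

-- ===== PORT B =====
-- Python's max() on a nonempty list (never called on [])
def pvMaxList : List Int → Int
  | [] => 0
  | x :: xs => xs.foldl max x

-- solve(seg, m): answers for segment seg given m = max of elements before it (none = empty prefix)
def pvSolve (seg : List Int) (m : Option Int) : List Int :=
  if h : 2 ≤ seg.length then
    let mid := seg.length / 2
    let m2 : Int := match m with
      | none => pvMaxList (seg.take mid)
      | some mv => max mv (pvMaxList (seg.take mid))
    pvSolve (seg.take mid) m ++ pvSolve (seg.drop mid) (some m2)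
  else
    match seg, m with
    | [], _ => []
    | _ :: _, none => [-1]
    | x :: _, some mv => [if x < mv then mv else -1]
termination_by seg.length
decreasing_by
  · simp; omega
  · simp; omega

def max_to_left_fun_alt (arr : List Int) : List Int := pvSolve arr none

-- ===== PRECONDITION & SPEC =====
-- Pre_ excludes only the empty list, on which A raises IndexError reading its initial maximum; B returns the empty list there.
def Pre_max_to_left_fun (arr : List Int) : Prop := arr ≠ []
instance (arr : List Int) : Decidable (Pre_max_to_left_fun arr) := by unfold Pre_max_to_left_fun; infer_instance
def pvWitness_max_to_left_fun : List Int := [3, 1, 4, 4, 2]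

def Spec_max_to_left_fun (arr : List Int) (out : List Int) : Prop := out = max_to_left_fun_alt arr
instance (arr : List Int) (out : List Int) : Decidable (Spec_max_to_left_fun arr out) := by unfold Spec_max_to_left_fun; infer_instance

-- ===== CLAIM (what is proved, stated in full; the proofs are below) =====
def Claim_equal_max_to_left_fun : Prop := ∀ (arr : List Int), Dom_max_to_left_fun arr → Pre_max_to_left_fun arr → Spec_max_to_left_fun arr (max_to_left_fun arr)

-- ===== LEMMAS AND PROOFS =====

-- common recursive characterisation: entry for y given running max m is (m if y < m else -1), new max is max m y
def pvGo (m : Int) : List Int → List Int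
  | [] => []
  | y :: ys => if y < m then m :: pvGo m ys else (-1) :: pvGo (max m y) ys

theorem pvGo_cons (m y : Int) (ys : List Int) :
    pvGo m (y :: ys) = if y < m then m :: pvGo m ys else (-1) :: pvGo (max m y) ys := rfl

theorem pvSolve_rec_some (seg : List Int) (mv : Int) (h : 2 ≤ seg.length) :
    pvSolve seg (some mv) = pvSolve (seg.take (seg.length / 2)) (some mv)
      ++ pvSolve (seg.drop (seg.length / 2)) (some (max mv (pvMaxList (seg.take (seg.length / 2))))) := by
  rw [pvSolve, dif_pos h]

theorem pvSolve_rec_none (seg : List Int) (h : 2 ≤ seg.length) :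
    pvSolve seg none = pvSolve (seg.take (seg.length / 2)) none
      ++ pvSolve (seg.drop (seg.length / 2)) (some (pvMaxList (seg.take (seg.length / 2)))) := by
  rw [pvSolve, dif_pos h]

theorem pvFoldlMax (l : List Int) : ∀ a b : Int, l.foldl max (max a b) = max a (l.foldl max b) := by
  induction l with
  | nil => intro a b; rfl
  | cons y ys ih =>
    intro a b
    simp only [List.foldl_cons, max_assoc, ih]

theorem pvGo_append (l1 : List Int) (h1 : l1 ≠ []) : ∀ (m : Int) (l2 : List Int),
    pvGo m (l1 ++ l2) = pvGo m l1 ++ pvGo (max m (pvMaxList l1)) l2 := by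
  induction l1 with
  | nil => exact absurd rfl h1
  | cons x xs ih =>
    intro m l2
    rw [List.cons_append, pvGo_cons, pvGo_cons]
    by_cases h : x < m
    · rw [if_pos h, if_pos h]
      cases xs with
      | nil =>
        simp [pvGo, pvMaxList, max_eq_left h.le]
      | cons y ys =>
        rw [ih (List.cons_ne_nil y ys) m l2]
        have hm : max m (pvMaxList (y :: ys)) = max m (pvMaxList (x :: y :: ys)) := by
          simp only [pvMaxList, List.foldl_cons]
          rw [← pvFoldlMax ys m y, ← pvFoldlMax ys m (max x y)]
          have : max m (max x y) = max m y := by omega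
          rw [this]
        rw [hm]
        simp
    · rw [if_neg h, if_neg h]
      cases xs with
      | nil =>
        simp [pvGo, pvMaxList]
      | cons y ys =>
        rw [ih (List.cons_ne_nil y ys) (max m x) l2]
        have hm : max (max m x) (pvMaxList (y :: ys)) = max m (pvMaxList (x :: y :: ys)) := by
          simp only [pvMaxList, List.foldl_cons]
          rw [← pvFoldlMax ys (max m x) y, ← pvFoldlMax ys m (max x y)]
          have : max (max m x) y = max m (max x y) := by omega
          rw [this]
        rw [hm]
        simp

theorem pvSolve_some (n : Nat) : ∀ (seg : List Int), seg.length ≤ n → seg ≠ [] →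
    ∀ m : Int, pvSolve seg (some m) = pvGo m seg := by
  induction n with
  | zero =>
    intro seg hle hne
    cases seg with
    | nil => exact absurd rfl hne
    | cons x xs => simp at hle
  | succ n ih =>
    intro seg hle hne m
    obtain ⟨x, xs, rfl⟩ := List.exists_cons_of_ne_nil hne
    cases xs with
    | nil =>
      rw [pvSolve]
      rw [dif_neg (by simp : ¬ (2 ≤ ([x] : List Int).length))]
      by_cases h : x < m <;> simp [pvGo, h]
    | cons y ys =>
      have h2 : 2 ≤ (x :: y :: ys).length := by simp
      rw [pvSolve_rec_some _ _ h2]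
      have hlen : (x :: y :: ys).length = ys.length + 2 := by simp
      have hmid1 : 1 ≤ (x :: y :: ys).length / 2 := by omega
      have hmidlt : (x :: y :: ys).length / 2 < (x :: y :: ys).length := by omega
      have hTlen : ((x :: y :: ys).take ((x :: y :: ys).length / 2)).length ≤ n := by
        rw [List.length_take]; omega
      have hDlen : ((x :: y :: ys).drop ((x :: y :: ys).length / 2)).length ≤ n := by
        rw [List.length_drop]; omega
      have hTne : (x :: y :: ys).take ((x :: y :: ys).length / 2) ≠ [] := by
        intro hc
        have := congrArg List.length hc
        rw [List.length_take] at this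
        simp only [List.length_nil, List.length_cons] at this
        omega
      have hDne : (x :: y :: ys).drop ((x :: y :: ys).length / 2) ≠ [] := by
        intro hc
        have := congrArg List.length hc
        rw [List.length_drop] at this
        simp only [List.length_nil, List.length_cons] at this
        omega
      rw [ih _ hTlen hTne m, ih _ hDlen hDne _]
      rw [← pvGo_append _ hTne m _, List.take_append_drop]

theorem pvSolve_none (n : Nat) : ∀ (x : Int) (xs : List Int), xs.length ≤ n →
    pvSolve (x :: xs) none = (-1) :: pvGo x xs := by
  induction n with
  | zero =>
    intro x xs hle
    have hx : xs = [] := List.eq_nil_of_length_eq_zero (by omega)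
    subst hx
    rw [pvSolve]
    norm_num [pvGo]
  | succ n ih =>
    intro x xs hle
    cases xs with
    | nil =>
      rw [pvSolve]
      norm_num [pvGo]
    | cons y ys =>
      have h2 : 2 ≤ (x :: y :: ys).length := by simp
      rw [pvSolve_rec_none _ h2]
      have hlen : (x :: y :: ys).length = ys.length + 2 := by simp
      have hmid1 : 1 ≤ (x :: y :: ys).length / 2 := by omega
      have hmidlt : (x :: y :: ys).length / 2 < (x :: y :: ys).length := by omega
      obtain ⟨k, hk⟩ : ∃ k, (x :: y :: ys).length / 2 = k + 1 := ⟨(x :: y :: ys).length / 2 - 1, by omega⟩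
      have hk' : (ys.length + 2) / 2 = k + 1 := by rw [← hlen]; exact hk
      have hle' : ys.length + 1 ≤ n + 1 := by simpa using hle
      rw [hk, List.take_succ_cons, List.drop_succ_cons]
      have hTtail : ((y :: ys).take k).length ≤ n := by
        rw [List.length_take, List.length_cons]; omega
      have hDne : (y :: ys).drop k ≠ [] := by
        intro hc
        have := congrArg List.length hc
        rw [List.length_drop, List.length_cons] at this
        simp only [List.length_nil] at this
        omega
      rw [ih x ((y :: ys).take k) hTtail,
          pvSolve_some ((y :: ys).drop k).length _ (le_refl _) hDne]
      have hsplit : (y :: ys) = (y :: ys).take k ++ (y :: ys).drop k := (List.take_append_drop _ _).symm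
      cases htk : (y :: ys).take k with
      | nil =>
        have hk0 : k = 0 := by
          have := congrArg List.length htk
          rw [List.length_take] at this
          simp at this
          omega
        subst hk0
        simp [pvGo, pvMaxList]
      | cons t ts =>
        rw [htk] at hsplit
        conv_rhs => rw [hsplit]
        rw [pvGo_append (t :: ts) (List.cons_ne_nil t ts) x ((y :: ys).drop k)]
        have hmx : pvMaxList (x :: t :: ts) = max x (pvMaxList (t :: ts)) := by
          cases ts with
          | nil => simp [pvMaxList]
          | cons u us =>
            simp only [pvMaxList, List.foldl_cons]
            rw [← pvFoldlMax us x (max t u)]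
            have : max (max x t) u = max x (max t u) := by omega
            rw [this]
        rw [hmx]
        simp [pvGo]

-- ===== A-side loop characterisation =====
theorem pvA_loop (ys : List Int) : ∀ (arr done : List Int) (m : Int),
    arr.drop done.length = ys → 1 ≤ done.length →
    ((PySem.List.pyRange done.length arr.length 1).foldl (pvStepA arr)
        (done ++ List.replicate ys.length (-1), m)).1 = done ++ pvGo m ys := by
  induction ys with
  | nil =>
    intro arr done m hdrop _
    have hlen : arr.length ≤ done.length := by
      by_contra h
      have := List.drop_eq_nil_iff.mp hdrop
      omega
    rw [PySem.List.pyRange_one_eq_nil (by exact_mod_cast hlen)]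
    simp [pvGo]
  | cons y ys ih =>
    intro arr done m hdrop _
    have hk : done.length < arr.length := by
      by_contra h
      rw [List.drop_eq_nil_of_le (by omega)] at hdrop
      exact List.cons_ne_nil _ _ hdrop.symm
    rw [PySem.List.pyRange_one_cons (by exact_mod_cast hk)]
    have hdrop' : arr.drop (done.length + 1) = ys := by
      have h2 := congrArg (List.drop 1) hdrop
      simp only [List.drop_drop] at h2
      simpa using h2
    have hget : PySem.List.pyGet? arr (done.length : Int) = some y := by
      have h0 : (arr.drop done.length)[0]? = some y := by rw [hdrop]; rfl
      rw [List.getElem?_drop, Nat.add_zero] at h0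
      simpa [PySem.List.pyGet?, PySem.List.pyIdx?, hk] using h0
    have hset : (done ++ List.replicate (y :: ys).length (-1 : Int)).set done.length m
        = (done ++ [m]) ++ List.replicate ys.length (-1) := by
      rw [List.set_append_right _ _ (le_refl _)]
      simp [List.replicate_succ]
    have h1 : ((done.length : Int) + 1) = ((done.length + 1 : Nat) : Int) := by push_cast; ring
    simp only [List.foldl_cons, pvStepA, hget]
    by_cases h : y < m
    · have hrec := ih arr (done ++ [m]) m (by simpa using hdrop') (by simp)
      simp only [List.length_append, List.length_singleton] at hrec
      rw [if_pos h]
      simp only [Int.toNat_natCast]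
      rw [hset, h1]
      rw [hrec, pvGo, if_pos h, List.append_assoc]
      simp
    · have hrec := ih arr (done ++ [-1]) (max m y) (by simpa using hdrop') (by simp)
      simp only [List.length_append, List.length_singleton] at hrec
      have hset' : (done ++ List.replicate (y :: ys).length (-1 : Int))
          = (done ++ [-1]) ++ List.replicate ys.length (-1) := by
        simp [List.replicate_succ]
      rw [if_neg h]
      have hmax : max m y = y := by omega
      rw [hmax] at hrec
      rw [hset', h1, hrec, pvGo, if_neg h, hmax, List.append_assoc]
      simp

-- ===== VERDICT (by name: the statement is the Claim_ definition above) =====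
theorem max_to_left_fun_spec : Claim_equal_max_to_left_fun := by
  intro arr _ hpre
  unfold Spec_max_to_left_fun
  obtain ⟨x, xs, rfl⟩ := List.exists_cons_of_ne_nil hpre
  have hget0 : PySem.List.pyGet? (x :: xs) (0 : Int) = some x := by
    simp [PySem.List.pyGet?, PySem.List.pyIdx?]
  have hloop := pvA_loop xs (x :: xs) [-1] x (by simp) (by simp)
  unfold max_to_left_fun max_to_left_fun_alt
  rw [hget0]
  norm_num at hloop ⊢
  rw [List.replicate_succ]
  rw [hloop]
  rw [pvSolve_none xs.length x xs (le_refl _)]
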